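-- pv_equiv track=rewrite | github.com/dumi33/Algorithm | 알고리즘/삼성역량테스트/구현_이차원배열과연산.py | oper
-- ===== SOURCE A (Python) =====
-- def oper(a,l):
--     for idx, row in enumerate(a) :
--         tmp = []
--         for n in set(row) :
--             if n :
--                 tmp.append((n,row.count(n)))
--         tmp = sorted(tmp, key = lambda x : (x[1],x[0]))
--         tmplen = len(tmp)
--         if tmplen > 50 : tmplen = 50
--         l = max(l,tmplen *2) # 최대 길이 갱신
--         a[idx] = []
--         for i in range(tmplen) :
--             a[idx].append(tmp[i][0])
--             a[idx].append(tmp[i][1])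
--
--     for idx,row in enumerate(a) :
--         for _ in range(l-len(row)) :
--             a[idx].append(0)
--
--     return a,l
-- ===== SOURCE B (Python) =====
-- def oper(a, l):
--     # pass 1: the final width is known in advance from each row's distinct nonzero count
--     for row in a:
--         l = max(l, 2 * min(50, len({x for x in row if x})))
--     # pass 2: build each padded output row directly, counting by sort + run-length scan
--     out = []
--     for row in a:
--         s = sorted(x for x in row if x)
--         pairs = []
--         for x in s:
--             if pairs and pairs[-1][0] == x:
--                 pairs[-1] = (x, pairs[-1][1] + 1)
--             else:
--                 pairs.append((x, 1))
--         pairs.sort(key=lambda p: (p[1], p[0]))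
--         flat = []
--         for v, c in pairs[:50]:
--             flat.append(v)
--             flat.append(c)
--         out.append(flat + [0] * (l - len(flat)))
--     return out, l
-- ===== Notes on version B (the rewrite author's own statement) =====
-- stated objective: alternative
-- what changed: B counts each row's values by sorting the nonzero entries once and run-length-scanning consecutive equal runs (instead of A's row.count scan over the whole row for every distinct value), computes the final width l in a separate first pass from each row's distinct nonzero count before any row is transformed, and builds each padded output row directly in one construction pass; B also does not mutate its argument.
import Mathlib
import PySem

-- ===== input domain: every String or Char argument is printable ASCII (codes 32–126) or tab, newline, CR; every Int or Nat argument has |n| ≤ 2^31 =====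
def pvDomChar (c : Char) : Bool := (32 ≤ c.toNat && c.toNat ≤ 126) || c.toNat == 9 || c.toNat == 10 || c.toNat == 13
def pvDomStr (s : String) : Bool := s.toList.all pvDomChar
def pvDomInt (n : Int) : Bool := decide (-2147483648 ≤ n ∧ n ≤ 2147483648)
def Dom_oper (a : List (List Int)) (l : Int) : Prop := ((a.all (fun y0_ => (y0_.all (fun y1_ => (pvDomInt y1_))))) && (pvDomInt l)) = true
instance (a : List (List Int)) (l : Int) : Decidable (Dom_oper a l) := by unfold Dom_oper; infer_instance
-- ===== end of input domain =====

-- B counts a row by sorting its nonzero entries once and run-length-scanning the equal runs,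
-- computes the final width l in a first pass before transforming any row, and builds each
-- padded output row directly (objective: alternative — sort+run-length counting instead of per-value scans). A mutates its argument in place; the
-- equivalence proved here is about the returned value only (B leaves the argument alone).

-- ===== PORT A =====
-- per-row locals of A's first loop body, as named helpers:
-- tmp = sorted([(n, row.count(n)) for n in set(row) if n], key=lambda x: (x[1], x[0]))
def operA_tmp (row : List Int) : List (Int × Int) :=
  PySem.List.sorted2
    ((PySem.Set.ofList row).foldl
      (fun acc n => if n ≠ 0 then acc ++ [(n, (PySem.List.count row n : Int))] else acc) [])
    (fun x => x.2) (fun x => x.1)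

-- tmplen = len(tmp); if tmplen > 50: tmplen = 50
def operA_len (row : List Int) : Int :=
  if ((operA_tmp row).length : Int) > 50 then 50 else ((operA_tmp row).length : Int)

-- a[idx] = []; for i in range(tmplen): append tmp[i][0]; append tmp[i][1]
def operA_row (row : List Int) : List Int :=
  (PySem.List.pyRange 0 (operA_len row) 1).foldl
    (fun acc i => (acc ++ [(PySem.List.pyGetD (operA_tmp row) i (0, 0)).1])
                    ++ [(PySem.List.pyGetD (operA_tmp row) i (0, 0)).2]) []

-- first loop of A, one row at a time, threading l = max(l, tmplen*2)
def operA_loop1 : List (List Int) → Int → List (List Int) × Int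
  | [], l => ([], l)
  | row :: rest, l =>
      let r := operA_loop1 rest (max l (operA_len row * 2))
      (operA_row row :: r.1, r.2)

-- second loop of A: for _ in range(l - len(row)): append 0
def operA_pad (l : Int) (row : List Int) : List Int :=
  (PySem.List.pyRange 0 (l - (row.length : Int)) 1).foldl (fun acc _ => acc ++ [0]) row

def oper (a : List (List Int)) (l : Int) : List (List Int) × Int :=
  let r := operA_loop1 a l
  (r.1.map (operA_pad r.2), r.2)

-- ===== PORT B =====
-- inner loop of B's pass 2: run-length encode the (sorted) list s
-- for x in s: if pairs and pairs[-1][0] == x: pairs[-1] = (x, pairs[-1][1]+1) else: pairs.append((x, 1))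
def operB_pairs (s : List Int) : List (Int × Int) :=
  s.foldl (fun ps x =>
    match ps.getLast? with
    | some p => if p.1 == x then ps.dropLast ++ [(x, p.2 + 1)] else ps ++ [(x, 1)]
    | none => ps ++ [(x, 1)]) []

-- body of B's pass 2 for one row: sort nonzeros, RLE, sort pairs, flatten capped at 50, pad to l
def operB_row (l : Int) (row : List Int) : List Int :=
  let s := PySem.List.sorted (row.filter (fun x => x ≠ 0)) (fun x => x)
  let pairs := PySem.List.sorted2 (operB_pairs s) (fun p => p.2) (fun p => p.1)
  let flat := (pairs.take 50).foldl (fun acc p => (acc ++ [p.1]) ++ [p.2]) []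
  flat ++ List.replicate (l - (flat.length : Int)).toNat 0

def oper_alt (a : List (List Int)) (l : Int) : List (List Int) × Int :=
  -- pass 1: l = max(l, 2 * min(50, len({x for x in row if x})))
  let l' := a.foldl (fun acc row =>
      max acc (2 * min 50 ((PySem.Set.ofList (row.filter (fun x => x ≠ 0))).length : Int))) l
  (a.map (operB_row l'), l')

-- ===== PRECONDITION & SPEC =====
def Spec_oper (a : List (List Int)) (l : Int) (out : List (List Int) × Int) : Prop := out = oper_alt a l
instance (a : List (List Int)) (l : Int) (out : List (List Int) × Int) : Decidable (Spec_oper a l out) := by unfold Spec_oper; infer_instance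

-- ===== CLAIM (what is proved, stated in full; the proofs are below) =====
def Claim_equal_oper : Prop := ∀ (a : List (List Int)) (l : Int), Dom_oper a l → Spec_oper a l (oper a l)

-- ===== LEMMAS AND PROOFS =====

-- the comparator of sorted2 with keys (·.2, ·.1), and the lex order it sorts by
def befCV (a b : Int × Int) : Bool :=
  decide (a.2 < b.2) || (!decide (b.2 < a.2) && decide (a.1 < b.1))
def rCV (a b : Int × Int) : Prop := a.2 < b.2 ∨ (a.2 = b.2 ∧ a.1 ≤ b.1)

lemma insertBy_cv_pairwise (x : Int × Int) (ys : List (Int × Int))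
    (h : ys.Pairwise rCV) : (PySem.List.insertBy befCV x ys).Pairwise rCV := by
  induction ys with
  | nil => simp [PySem.List.insertBy]
  | cons y ys ih =>
    rw [List.pairwise_cons] at h
    obtain ⟨hy, hys⟩ := h
    rw [PySem.List.insertBy]
    by_cases hb : befCV x y = true
    · rw [if_pos hb]
      have hxy : rCV x y := by
        simp only [befCV, Bool.or_eq_true, Bool.and_eq_true, Bool.not_eq_true',
          decide_eq_true_eq, decide_eq_false_iff_not] at hb
        unfold rCV; omega
      refine List.Pairwise.cons ?_ (List.Pairwise.cons hy hys)
      intro z hz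
      rcases List.mem_cons.mp hz with rfl | hz
      · exact hxy
      · have := hy z hz
        unfold rCV at *; omega
    · rw [if_neg hb]
      refine List.Pairwise.cons ?_ (ih hys)
      intro z hz
      rw [PySem.List.insertBy_mem_iff] at hz
      rcases hz with rfl | hz
      · simp only [befCV, Bool.or_eq_true, Bool.and_eq_true, Bool.not_eq_true',
          decide_eq_true_eq, decide_eq_false_iff_not, not_or, not_and] at hb
        unfold rCV; omega
      · exact hy z hz

lemma foldl_insertBy_cv_pairwise (ps acc : List (Int × Int)) (hacc : acc.Pairwise rCV) :
    (ps.foldl (fun acc x => PySem.List.insertBy befCV x acc) acc).Pairwise rCV := by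
  induction ps generalizing acc with
  | nil => exact hacc
  | cons p ps ih => exact ih _ (insertBy_cv_pairwise p acc hacc)

lemma sorted2_cv_pairwise (ps : List (Int × Int)) :
    (PySem.List.sorted2 ps (fun p => p.2) (fun p => p.1) false).Pairwise rCV :=
  foldl_insertBy_cv_pairwise ps [] (List.Pairwise.nil)

-- the sorted order under an antisymmetric total key is unique: sorted2 of a permutation
lemma sorted2_cv_eq_of_perm (ps qs : List (Int × Int)) (h : ps.Perm qs) :
    PySem.List.sorted2 ps (fun p => p.2) (fun p => p.1) false
      = PySem.List.sorted2 qs (fun p => p.2) (fun p => p.1) false := by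
  refine List.Perm.eq_of_pairwise (le := rCV) ?_ (sorted2_cv_pairwise ps) (sorted2_cv_pairwise qs) ?_
  · intro a b _ _ hab hba
    unfold rCV at hab hba
    have h2 : a.2 = b.2 := by omega
    have h1 : a.1 = b.1 := by omega
    exact Prod.ext h1 h2
  · exact ((PySem.List.sorted2_perm ps _ _ _).trans h).trans (PySem.List.sorted2_perm qs _ _ _).symm


-- set(filter) = filter(set): Set.ofList commutes with List.filter
lemma ofList_filter_acc (p : Int → Bool) (xs s : List Int) :
    (xs.foldl PySem.Set.add s).filter p = (xs.filter p).foldl PySem.Set.add (s.filter p) := by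
  induction xs generalizing s with
  | nil => simp
  | cons x xs ih =>
    have hadd : (PySem.Set.add s x).filter p =
        if p x then PySem.Set.add (s.filter p) x else s.filter p := by
      unfold PySem.Set.add PySem.Set.contains
      by_cases hm : x ∈ s <;> by_cases hp : p x <;>
        simp [hm, hp, List.filter_append, List.mem_filter]
    simp only [List.foldl_cons, List.filter_cons]
    rw [ih (PySem.Set.add s x), hadd]
    by_cases hp : p x <;> simp [hp]

lemma ofList_filter (p : Int → Bool) (xs : List Int) :
    PySem.Set.ofList (xs.filter p) = (PySem.Set.ofList xs).filter p := by
  rw [PySem.Set.ofList_eq_foldl, PySem.Set.ofList_eq_foldl, ofList_filter_acc]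
  rfl

-- Set.ofList is a subsequence of its input
lemma ofList_sublist (xs : List Int) : (PySem.Set.ofList xs).Sublist xs := by
  induction xs using List.reverseRecOn with
  | nil => simp
  | append_singleton t x ih =>
    rw [PySem.Set.ofList_append_singleton, PySem.Set.add]
    split
    · exact ih.trans (List.sublist_append_left t [x])
    · exact List.Sublist.append ih (List.Sublist.refl [x])


-- run-length encoding of a sorted list: one pair (n, count) per distinct value, in order
lemma rle_sorted (t : List Int) (ht : t.Pairwise (· ≤ ·)) :
    operB_pairs t = (PySem.Set.ofList t).map (fun n => (n, (PySem.List.count t n : Int))) := by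
  induction t using List.reverseRecOn with
  | nil => rfl
  | append_singleton t x ih =>
    rw [List.pairwise_append] at ht
    obtain ⟨ht1, -, hle⟩ := ht
    have hstep : operB_pairs (t ++ [x])
        = match (operB_pairs t).getLast? with
          | some p => if p.1 == x then (operB_pairs t).dropLast ++ [(x, p.2 + 1)]
                      else operB_pairs t ++ [(x, 1)]
          | none => operB_pairs t ++ [(x, 1)] := by
      unfold operB_pairs
      rw [List.foldl_append]
      rfl
    have hIH := ih ht1
    have hcnt : ∀ n : Int, PySem.List.count (t ++ [x]) n
        = PySem.List.count t n + (if n = x then 1 else 0) := by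
      intro n
      rw [PySem.List.count_eq, PySem.List.count_eq, List.count_append]
      by_cases h : n = x
      · subst h; simp
      · simp [h, show ¬ x = n from fun hh => h hh.symm]
    by_cases hx : x ∈ t
    · -- x is the last (largest) distinct value of t; its run grows by one
      have hxu : x ∈ PySem.Set.ofList t := (PySem.Set.mem_ofList t x).mpr hx
      have hne : PySem.Set.ofList t ≠ [] := by
        intro h0; rw [h0] at hxu; exact absurd hxu (List.not_mem_nil)
      obtain ⟨w, z, hw⟩ := (List.eq_nil_or_concat' (PySem.Set.ofList t)).resolve_left hne
      have hpwu : (PySem.Set.ofList t).Pairwise (· ≤ ·) :=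
        List.Pairwise.sublist (ofList_sublist t) ht1
      have hx_or : x ∈ w ∨ x = z := by
        have h' := hxu; rw [hw] at h'; simpa using h'
      have hz_mem : z ∈ t := (PySem.Set.mem_ofList t z).mp (by rw [hw]; simp)
      have hzlex : z ≤ x := hle z hz_mem x (List.mem_singleton_self x)
      have hzx : x = z := by
        rcases hx_or with hxw | hxz
        · have hxlez : x ≤ z := by
            rw [hw, List.pairwise_append] at hpwu
            exact hpwu.2.2 x hxw z (List.mem_singleton_self z)
          omega
        · omega
      subst hzx
      have hnodup : (PySem.Set.ofList t).Nodup := PySem.Set.nodup_ofList t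
      have hxw : x ∉ w := by
        rw [hw] at hnodup
        exact fun hmem => (List.nodup_append.mp hnodup).2.2 x hmem x (List.mem_singleton_self x) rfl
      have hadd : PySem.Set.ofList (t ++ [x]) = PySem.Set.ofList t := by
        rw [PySem.Set.ofList_append_singleton, PySem.Set.add]
        simp [PySem.Set.contains, hxu]
      rw [hstep, hIH, hw]
      simp only [List.map_append, List.map_cons, List.map_nil, List.getLast?_concat,
        beq_self_eq_true, if_pos, List.dropLast_concat]
      rw [hadd, hw]
      simp only [List.map_append, List.map_cons, List.map_nil]
      congr 1
      · apply List.map_congr_left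
        intro n hn
        have hnx : n ≠ x := fun h => hxw (h ▸ hn)
        rw [hcnt n, if_neg hnx, Nat.add_zero]
      · rw [hcnt x, if_pos rfl]
        push_cast
        ring_nf
    · -- new largest value: a fresh run of length 1 is appended
      have hxu : x ∉ PySem.Set.ofList t := fun h => hx ((PySem.Set.mem_ofList t x).mp h)
      have hadd : PySem.Set.ofList (t ++ [x]) = PySem.Set.ofList t ++ [x] := by
        rw [PySem.Set.ofList_append_singleton, PySem.Set.add]
        simp only [PySem.Set.contains]
        rw [if_neg (by simpa using hxu)]
      have hbranch : (match (operB_pairs t).getLast? with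
          | some p => if p.1 == x then (operB_pairs t).dropLast ++ [(x, p.2 + 1)]
                      else operB_pairs t ++ [(x, 1)]
          | none => operB_pairs t ++ [(x, 1)]) = operB_pairs t ++ [(x, 1)] := by
        rcases h0 : (operB_pairs t).getLast? with _ | p
        · rfl
        · have hp : p ∈ operB_pairs t := List.mem_of_getLast? h0
          rw [hIH] at hp
          obtain ⟨n, hn, rfl⟩ := List.mem_map.mp hp
          have hnx : n ≠ x := fun h => hxu (h ▸ hn)
          simp [hnx]
      rw [hstep, hbranch, hIH, hadd]
      simp only [List.map_append, List.map_cons, List.map_nil]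
      congr 1
      · apply List.map_congr_left
        intro n hn
        have hnx : n ≠ x := fun h => hxu (h ▸ hn)
        rw [hcnt n, if_neg hnx, Nat.add_zero]
      · have h0 : PySem.List.count t x = 0 := by
          rw [PySem.List.count_eq, List.count_eq_zero]; exact hx
        rw [hcnt x, if_pos rfl, h0]
        simp

-- A's unsorted pair list, named
def pairsA (row : List Int) : List (Int × Int) :=
  (PySem.Set.ofList row).foldl
    (fun acc n => if n ≠ 0 then acc ++ [(n, (PySem.List.count row n : Int))] else acc) []

-- B's per-row sorted nonzero list, named
def sNZ (row : List Int) : List Int :=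
  PySem.List.sorted (row.filter (fun x => x ≠ 0)) (fun x => x)

lemma pairsA_eq (row : List Int) :
    pairsA row = (PySem.Set.ofList (row.filter (fun x => x ≠ 0))).map
      (fun n => (n, (PySem.List.count row n : Int))) := by
  unfold pairsA
  rw [PySem.List.foldl_append_ite (p := fun n : Int => n ≠ 0)
    (f := fun n => (n, (PySem.List.count row n : Int))), ofList_filter]
  simp

lemma pairsB_perm_pairsA (row : List Int) :
    (operB_pairs (sNZ row)).Perm (pairsA row) := by
  have hsp : (sNZ row).Pairwise (· ≤ ·) := by
    unfold sNZ; exact PySem.List.sorted_pairwise _ _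
  have hperm : (sNZ row).Perm (row.filter (fun x => x ≠ 0)) := by
    unfold sNZ; exact PySem.List.sorted_perm _ _ _
  rw [rle_sorted (sNZ row) hsp, pairsA_eq]
  have hcnt : ∀ n ∈ PySem.Set.ofList (sNZ row),
      (n, (PySem.List.count (sNZ row) n : Int)) = (n, (PySem.List.count row n : Int)) := by
    intro n hn
    have hnf : n ∈ row.filter (fun x => x ≠ 0) :=
      hperm.mem_iff.mp ((PySem.Set.mem_ofList _ n).mp hn)
    have hq : (fun x : Int => decide (x ≠ 0)) n = true := (List.mem_filter.mp hnf).2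
    have h1 : PySem.List.count (sNZ row) n = PySem.List.count (row.filter (fun x => x ≠ 0)) n := by
      rw [PySem.List.count_eq, PySem.List.count_eq]
      exact hperm.count_eq n
    have h2 : List.count n (row.filter (fun x : Int => decide (x ≠ 0))) = List.count n row :=
      List.count_filter hq
    rw [h1, PySem.List.count_eq, PySem.List.count_eq, h2]
  rw [List.map_congr_left hcnt]
  apply List.Perm.map
  rw [List.perm_ext_iff_of_nodup (PySem.Set.nodup_ofList _) (PySem.Set.nodup_ofList _)]
  intro n
  rw [PySem.Set.mem_ofList, PySem.Set.mem_ofList, hperm.mem_iff]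

-- the per-row sorted pair lists of A and B coincide
lemma tmp_eq (row : List Int) :
    operA_tmp row = PySem.List.sorted2 (operB_pairs (sNZ row)) (fun p => p.2) (fun p => p.1) := by
  have h : operA_tmp row
      = PySem.List.sorted2 (pairsA row) (fun p => p.2) (fun p => p.1) := rfl
  rw [h]
  exact sorted2_cv_eq_of_perm _ _ (pairsB_perm_pairsA row).symm

lemma tmp_len (row : List Int) :
    (operA_tmp row).length = (PySem.Set.ofList (row.filter (fun x => x ≠ 0))).length := by
  have h : operA_tmp row
      = PySem.List.sorted2 (pairsA row) (fun p => p.2) (fun p => p.1) := rfl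
  rw [h, (PySem.List.sorted2_perm (pairsA row) _ _ _).length_eq, pairsA_eq,
    List.length_map]

lemma len_eq_min (row : List Int) :
    operA_len row * 2
      = 2 * min 50 ((PySem.Set.ofList (row.filter (fun x => x ≠ 0))).length : Int) := by
  rw [operA_len, tmp_len]
  split <;> omega

-- A's index loop over range(m) equals flatten-of-take
lemma foldl_range_pairs (tmp : List (Int × Int)) (m : Nat) (hm : m ≤ tmp.length)
    (init : List Int) :
    (PySem.List.pyRange 0 (m : Int) 1).foldl
      (fun acc i => (acc ++ [(PySem.List.pyGetD tmp i (0, 0)).1])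
                      ++ [(PySem.List.pyGetD tmp i (0, 0)).2]) init
      = init ++ (tmp.take m).flatMap (fun p => [p.1, p.2]) := by
  induction m generalizing init with
  | zero => simp
  | succ k ih =>
    have hk : k ≤ tmp.length := Nat.le_of_succ_le hm
    have hc : ((k : Int) + 1) = ((k + 1 : Nat) : Int) := by push_cast; ring
    rw [← hc, PySem.List.pyRange_one_succ_right (by positivity), List.foldl_append]
    rw [ih hk]
    have hklt : k < tmp.length := hm
    simp only [List.foldl_cons, List.foldl_nil,
      PySem.List.pyGetD_ofNat tmp k (0, 0) hklt]
    have ht : List.take (k + 1) tmp = List.take k tmp ++ [tmp[k]] := by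
      rw [List.take_add_one, List.getElem?_eq_getElem hklt, Option.toList_some]
    rw [ht, List.flatMap_append]
    simp

-- A's zero-append loop over range(n) equals append-replicate
lemma pad_foldl (n : Nat) (row : List Int) :
    (PySem.List.pyRange 0 (n : Int) 1).foldl (fun acc _ => acc ++ [0]) row
      = row ++ List.replicate n 0 := by
  induction n with
  | zero => simp
  | succ k ih =>
    have hc : ((k : Int) + 1) = ((k + 1 : Nat) : Int) := by push_cast; ring
    rw [← hc, PySem.List.pyRange_one_succ_right (by positivity), List.foldl_append, ih]
    simp [List.replicate_succ']

lemma pad_eq (l : Int) (row : List Int) :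
    operA_pad l row = row ++ List.replicate (l - (row.length : Int)).toNat 0 := by
  unfold operA_pad
  generalize (l - (row.length : Int)) = m
  rcases le_or_gt m 0 with h | h
  · rw [PySem.List.pyRange_one_eq_nil h]
    simp [Int.toNat_of_nonpos h]
  · rw [show PySem.List.pyRange 0 m 1 = PySem.List.pyRange 0 ((m.toNat : Nat) : Int) 1 by
        rw [Int.toNat_of_nonneg h.le], pad_foldl]

-- padded A-row = B's per-row output
lemma operB_flat_eq (ps : List (Int × Int)) (init : List Int) :
    ps.foldl (fun acc p => (acc ++ [p.1]) ++ [p.2]) init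
      = init ++ ps.flatMap (fun p => [p.1, p.2]) := by
  have h : ps.foldl (fun acc p => (acc ++ [p.1]) ++ [p.2]) init
      = ps.foldl (fun acc p => acc ++ [p.1, p.2]) init := by
    apply PySem.List.foldl_congr_mem
    intro acc p _
    simp
  rw [h, PySem.List.foldl_append_eq_flatMap]

lemma row_flat_eq (row : List Int) :
    operA_row row
      = ((PySem.List.sorted2 (operB_pairs (sNZ row)) (fun p => p.2) (fun p => p.1)).take 50).foldl
          (fun acc p => (acc ++ [p.1]) ++ [p.2]) [] := by
  have h0 : 0 ≤ operA_len row := by rw [operA_len]; split <;> positivity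
  have hlen : (operA_len row).toNat = min 50 (operA_tmp row).length := by
    rw [operA_len]; split <;> omega
  have hle : (operA_len row).toNat ≤ (operA_tmp row).length := by omega
  have hrange : operA_len row = (((operA_len row).toNat : Nat) : Int) :=
    (Int.toNat_of_nonneg h0).symm
  rw [operA_row, hrange, foldl_range_pairs (operA_tmp row) (operA_len row).toNat hle,
    List.nil_append, operB_flat_eq, List.nil_append, ← tmp_eq, hlen]
  congr 1
  rcases le_or_gt (operA_tmp row).length 50 with h | h
  · rw [min_eq_right h, List.take_length, List.take_of_length_le h]
  · rw [min_eq_left h.le]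

-- padded A-row = B's per-row output
lemma row_eq (l : Int) (row : List Int) :
    operA_pad l (operA_row row) = operB_row l row := by
  rw [pad_eq, operB_row, row_flat_eq]
  rfl

-- A's first loop computes A's rows and B's running maximum
lemma loop1_eq (rows : List (List Int)) (l : Int) :
    operA_loop1 rows l
      = (rows.map operA_row,
         rows.foldl (fun acc row =>
           max acc (2 * min 50 ((PySem.Set.ofList (row.filter (fun x => x ≠ 0))).length : Int))) l) := by
  induction rows generalizing l with
  | nil => rfl
  | cons row rest ih =>
    simp only [operA_loop1, len_eq_min, ih, List.map_cons, List.foldl_cons]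

-- ===== VERDICT (by name: the statement is the Claim_ definition above) =====
theorem oper_spec : Claim_equal_oper := by
  intro a l _
  show oper a l = oper_alt a l
  unfold oper oper_alt
  simp only [loop1_eq, List.map_map]
  exact Prod.ext (List.map_congr_left (fun row _ => row_eq _ row)) rfl
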